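-- pv_equiv track=rewrite | github.com/harsha711/cross-modal-audio-text-captioning | src/reference_metrics.py | _word_alignment
-- ===== SOURCE A (Python) =====
-- from typing import List, Dict, Tuple
--
-- def _word_alignment(candidate: List[str], reference: List[str]) -> Tuple[int, int, int]:
--     """
--     Align words between candidate and reference
--
--     Returns:
--         matched, candidate_len, reference_len
--     """
--     matched = 0
--     candidate_matched = set()
--     reference_matched = set()
--
--     # Exact matching
--     for i, c_word in enumerate(candidate):
--         for j, r_word in enumerate(reference):
--             if c_word == r_word and i not in candidate_matched and j not in reference_matched:
--                 matched += 1
--                 candidate_matched.add(i)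
--                 reference_matched.add(j)
--                 break
--
--     return matched, len(candidate), len(reference)
-- ===== SOURCE B (Python) =====
-- from typing import List, Tuple
--
-- def _word_alignment(candidate: List[str], reference: List[str]) -> Tuple[int, int, int]:
--     """
--     Align words between candidate and reference
--
--     Returns:
--         matched, candidate_len, reference_len
--     """
--     remaining = {}
--     for w in reference:
--         remaining[w] = remaining.get(w, 0) + 1
--     matched = 0
--     for w in candidate:
--         if remaining.get(w, 0) > 0:
--             matched += 1
--             remaining[w] = remaining[w] - 1
--     return matched, len(candidate), len(reference)
-- ===== Notes on version B (the rewrite author's own statement) =====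
-- stated objective: faster
-- what changed: Replaces the O(n*m) nested index scan with matched-index sets by a single counting dict of the reference decremented in one pass over the candidate (greedy match count = multiset-intersection count).
import Mathlib
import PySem

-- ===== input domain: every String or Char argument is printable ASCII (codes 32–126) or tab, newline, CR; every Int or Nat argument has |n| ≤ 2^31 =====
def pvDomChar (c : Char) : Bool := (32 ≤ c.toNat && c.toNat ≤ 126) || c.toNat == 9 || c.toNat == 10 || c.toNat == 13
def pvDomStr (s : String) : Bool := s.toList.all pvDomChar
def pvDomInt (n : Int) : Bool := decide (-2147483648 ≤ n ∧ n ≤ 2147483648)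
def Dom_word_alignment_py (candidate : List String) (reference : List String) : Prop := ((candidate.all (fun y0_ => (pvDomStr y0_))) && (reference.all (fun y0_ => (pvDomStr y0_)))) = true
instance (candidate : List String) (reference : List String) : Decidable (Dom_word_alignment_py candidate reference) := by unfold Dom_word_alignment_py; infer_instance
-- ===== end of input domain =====

-- B replaces A's O(n*m) nested scan over reference with matched-index sets by a
-- reference-count dict decremented in one pass over candidate (same return value).

-- ===== PORT A =====
-- inner 'for j, r_word in enumerate(reference): … break' loop of A
def waScan (cm : PySem.Set Int) (rm : PySem.Set Int) (i : Int) (w : String) :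
    List (Int × String) → Option Int
  | [] => none
  | (j, r) :: rest =>
      if w == r && !(PySem.Set.contains cm i) && !(PySem.Set.contains rm j) then some j
      else waScan cm rm i w rest

-- one outer-loop iteration of A: state = (matched, candidate_matched, reference_matched)
def waStep (reference : List String) (s : Int × PySem.Set Int × PySem.Set Int)
    (p : Int × String) : Int × PySem.Set Int × PySem.Set Int :=
  match waScan s.2.1 s.2.2 p.1 p.2 (PySem.List.enumerate reference 0) with
  | some j => (s.1 + 1, PySem.Set.add s.2.1 p.1, PySem.Set.add s.2.2 j)
  | none => s

def word_alignment_py (candidate : List String) (reference : List String) : List Int :=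
  let st := (PySem.List.enumerate candidate 0).foldl (waStep reference)
    (0, PySem.Set.empty, PySem.Set.empty)
  [st.1, (candidate.length : Int), (reference.length : Int)]

-- ===== PORT B =====
-- one candidate-loop iteration of B: state = (matched, remaining dict)
-- (B's 'remaining[w] - 1' reads a key the guard has just proved present, so getD is exact)
def wbStep (s : Int × PySem.Dict String Int) (w : String) : Int × PySem.Dict String Int :=
  if s.2.getD w 0 > 0 then (s.1 + 1, s.2.insert w (s.2.getD w 0 - 1)) else s

def word_alignment_py_alt (candidate : List String) (reference : List String) : List Int :=
  let remaining := reference.foldl (fun d w => d.insert w (d.getD w 0 + 1)) PySem.Dict.empty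
  let st := candidate.foldl wbStep (0, remaining)
  [st.1, (candidate.length : Int), (reference.length : Int)]

-- ===== PRECONDITION & SPEC =====
def Spec_word_alignment_py (candidate : List String) (reference : List String) (out : List Int) : Prop := out = word_alignment_py_alt candidate reference
instance (candidate : List String) (reference : List String) (out : List Int) : Decidable (Spec_word_alignment_py candidate reference out) := by unfold Spec_word_alignment_py; infer_instance

-- ===== CLAIM (what is proved, stated in full; the proofs are below) =====
def Claim_equal_word_alignment_py : Prop := ∀ (candidate : List String) (reference : List String), Dom_word_alignment_py candidate reference → Spec_word_alignment_py candidate reference (word_alignment_py candidate reference)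

-- ===== LEMMAS AND PROOFS =====

-- number of still-unmatched occurrences of word w in the enumerated reference L
def cntU (L : List (Int × String)) (rm : PySem.Set Int) (w : String) : Nat :=
  L.countP (fun p => p.2 == w && !(PySem.Set.contains rm p.1))

theorem beq_swap (a b : String) : (a == b) = (b == a) := by
  by_cases h : a = b
  · subst h; rfl
  · rw [beq_eq_false_iff_ne.mpr h, beq_eq_false_iff_ne.mpr (fun e => h e.symm)]

theorem contains_false_iff (s : PySem.Set Int) (x : Int) :
    PySem.Set.contains s x = false ↔ x ∉ s := by
  rw [Bool.eq_false_iff]; exact not_congr (PySem.Set.contains_iff _ _)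

theorem contains_add_self (rm : PySem.Set Int) (j : Int) :
    PySem.Set.contains (PySem.Set.add rm j) j = true :=
  (PySem.Set.contains_iff _ _).mpr ((PySem.Set.mem_add _ _ _).mpr (Or.inr rfl))

theorem contains_add_ne (rm : PySem.Set Int) (j x : Int) (hx : x ≠ j) :
    PySem.Set.contains (PySem.Set.add rm j) x = PySem.Set.contains rm x := by
  rcases Bool.eq_false_or_eq_true (PySem.Set.contains rm x) with h | h
  · rw [h, (PySem.Set.contains_iff _ _).mpr ((PySem.Set.mem_add _ _ _).mpr (Or.inl ((PySem.Set.contains_iff _ _).mp h)))]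
  · rw [h, (contains_false_iff _ _).mpr]
    intro hm
    rcases (PySem.Set.mem_add _ _ _).mp hm with hm | hm
    · exact absurd hm ((contains_false_iff _ _).mp h)
    · exact hx hm

theorem waScan_cons_true (cm rm : PySem.Set Int) (i : Int) (w : String) (j : Int) (r : String)
    (rest : List (Int × String))
    (h : (w == r && !(PySem.Set.contains cm i) && !(PySem.Set.contains rm j)) = true) :
    waScan cm rm i w ((j, r) :: rest) = some j := by
  simp only [waScan, h]; simp

theorem waScan_cons_false (cm rm : PySem.Set Int) (i : Int) (w : String) (j : Int) (r : String)
    (rest : List (Int × String))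
    (h : (w == r && !(PySem.Set.contains cm i) && !(PySem.Set.contains rm j)) = false) :
    waScan cm rm i w ((j, r) :: rest) = waScan cm rm i w rest := by
  simp only [waScan, h]; simp

theorem cntU_cons (j : Int) (r : String) (rest : List (Int × String)) (rm : PySem.Set Int)
    (w : String) :
    cntU ((j, r) :: rest) rm w
      = cntU rest rm w + (if (r == w && !(PySem.Set.contains rm j)) = true then 1 else 0) := by
  simp only [cntU, List.countP_cons]

theorem waScan_eq_none_iff (cm rm : PySem.Set Int) (i : Int) (w : String)
    (L : List (Int × String)) (hcm : PySem.Set.contains cm i = false) :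
    waScan cm rm i w L = none ↔ cntU L rm w = 0 := by
  induction L with
  | nil => simp [waScan, cntU]
  | cons p rest ih =>
    obtain ⟨j, r⟩ := p
    have hCeq : (w == r && !(PySem.Set.contains cm i) && !(PySem.Set.contains rm j))
        = (r == w && !(PySem.Set.contains rm j)) := by
      rw [hcm, beq_swap]; simp only [Bool.not_false, Bool.and_true]
    rcases Bool.eq_false_or_eq_true (r == w && !(PySem.Set.contains rm j)) with hP | hP
    · rw [waScan_cons_true cm rm i w j r rest (hCeq.trans hP), cntU_cons, if_pos hP]
      simp
    · rw [waScan_cons_false cm rm i w j r rest (hCeq.trans hP),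
        cntU_cons, if_neg (by rw [hP]; exact Bool.false_ne_true), Nat.add_zero]
      exact ih

theorem waScan_some_mem (cm rm : PySem.Set Int) (i : Int) (w : String)
    (L : List (Int × String)) (j : Int) (h : waScan cm rm i w L = some j) :
    (j, w) ∈ L ∧ PySem.Set.contains rm j = false := by
  induction L with
  | nil => simp [waScan] at h
  | cons p rest ih =>
    obtain ⟨j0, r⟩ := p
    rcases Bool.eq_false_or_eq_true
        (w == r && !(PySem.Set.contains cm i) && !(PySem.Set.contains rm j0)) with hc | hc
    · rw [waScan_cons_true cm rm i w j0 r rest hc] at h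
      simp only [Option.some.injEq] at h
      simp only [Bool.and_eq_true, beq_iff_eq, Bool.not_eq_true'] at hc
      subst h
      exact ⟨by rw [hc.1.1]; exact List.mem_cons_self, hc.2⟩
    · rw [waScan_cons_false cm rm i w j0 r rest hc] at h
      obtain ⟨h1, h2⟩ := ih h
      exact ⟨List.mem_cons_of_mem _ h1, h2⟩

-- adding the matched index to rm removes exactly one unmatched occurrence of w, none of any other word
theorem cntU_add (rm : PySem.Set Int) (w : String) (L : List (Int × String)) (j : Int)
    (hnd : (L.map (·.1)).Nodup) (hj : (j, w) ∈ L) (hjr : PySem.Set.contains rm j = false) :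
    cntU L (PySem.Set.add rm j) w = cntU L rm w - 1 ∧
      (∀ w', w' ≠ w → cntU L (PySem.Set.add rm j) w' = cntU L rm w') ∧ 1 ≤ cntU L rm w := by
  induction L with
  | nil => simp at hj
  | cons p rest ih =>
    obtain ⟨j0, r⟩ := p
    simp only [List.map_cons, List.nodup_cons] at hnd
    rcases List.mem_cons.mp hj with he | hrest
    · -- the matched pair is the head
      have hj0 : j0 = j := (congrArg Prod.fst he).symm
      have hr : r = w := (congrArg Prod.snd he).symm
      subst hj0; subst hr
      have hrest_eq : ∀ w', cntU rest (PySem.Set.add rm j0) w' = cntU rest rm w' := by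
        intro w'
        apply List.countP_congr
        intro p hp
        rw [contains_add_ne rm j0 p.1 (fun e => hnd.1 (e ▸ List.mem_map_of_mem hp))]
      have hP_rm : (r == r && !(PySem.Set.contains rm j0)) = true := by
        rw [hjr]; simp
      have hP_add : (r == r && !(PySem.Set.contains (PySem.Set.add rm j0) j0)) = false := by
        rw [contains_add_self]; simp
      refine ⟨?_, ?_, ?_⟩
      · rw [cntU_cons, cntU_cons, hrest_eq r,
          if_pos hP_rm, if_neg (by rw [hP_add]; exact Bool.false_ne_true)]
        omega
      · intro w' hw'
        have hb : (r == w') = false := beq_eq_false_iff_ne.mpr (fun e => hw' e.symm)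
        rw [cntU_cons, cntU_cons, hrest_eq w',
          if_neg (by rw [hb, Bool.false_and]; exact Bool.false_ne_true),
          if_neg (by rw [hb, Bool.false_and]; exact Bool.false_ne_true)]
      · rw [cntU_cons, if_pos hP_rm]
        omega
    · -- the matched pair is in the tail
      obtain ⟨ih1, ih2, ih3⟩ := ih hnd.2 hrest
      have hjne : j0 ≠ j := fun he => hnd.1 (he ▸ List.mem_map_of_mem hrest)
      have hhead : ∀ w', (r == w' && !(PySem.Set.contains (PySem.Set.add rm j) j0))
          = (r == w' && !(PySem.Set.contains rm j0)) := by
        intro w'; rw [contains_add_ne rm j j0 hjne]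
      refine ⟨?_, ?_, ?_⟩
      · rw [cntU_cons, cntU_cons, hhead w, ih1]
        omega
      · intro w' hw'
        rw [cntU_cons, cntU_cons, hhead w', ih2 w' hw']
      · rw [cntU_cons]
        omega

theorem nodup_fst_enumerate (xs : List String) :
    ((PySem.List.enumerate xs 0).map (·.1)).Nodup := by
  have h2 : ((PySem.List.enumerate xs 0).map (·.1)).Pairwise (· < ·) :=
    List.pairwise_map.mpr (PySem.List.pairwise_lt_enumerate xs 0)
  exact h2.imp ne_of_lt

theorem contains_empty_int (x : Int) :
    PySem.Set.contains PySem.Set.empty x = false := rfl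

theorem cntU_enumerate_empty (xs : List String) (s : Int) (w : String) :
    cntU (PySem.List.enumerate xs s) PySem.Set.empty w = xs.count w := by
  induction xs generalizing s with
  | nil => simp [cntU, PySem.List.enumerate_nil]
  | cons x rest ih =>
    rw [PySem.List.enumerate_cons, cntU_cons, ih (s + 1), List.count_cons, contains_empty_int]
    simp only [Bool.not_false, Bool.and_true]

-- main loop invariant: both folds produce the same matched count
theorem main_inv (reference : List String) (cs : List String) (k : Int) (m : Int)
    (cm rm : PySem.Set Int) (d : PySem.Dict String Int)
    (hcm : ∀ x ∈ cm, x < k)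
    (hd : ∀ w, d.getD w 0 = (cntU (PySem.List.enumerate reference 0) rm w : Int)) :
    ((PySem.List.enumerate cs k).foldl (waStep reference) (m, cm, rm)).1
      = (cs.foldl wbStep (m, d)).1 := by
  induction cs generalizing k m cm rm d with
  | nil => simp [PySem.List.enumerate_nil]
  | cons w rest ih =>
    rw [PySem.List.enumerate_cons]
    have hkfree : PySem.Set.contains cm k = false :=
      (contains_false_iff _ _).mpr (fun h => absurd (hcm k h) (lt_irrefl k))
    simp only [List.foldl_cons]
    by_cases hz : cntU (PySem.List.enumerate reference 0) rm w = 0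
    · have hnone : waScan cm rm k w (PySem.List.enumerate reference 0) = none :=
        (waScan_eq_none_iff cm rm k w _ hkfree).mpr hz
      have hB : wbStep (m, d) w = (m, d) := by
        simp only [wbStep]; rw [if_neg]; simp [hd w, hz]
      rw [hB]
      simp only [waStep, hnone]
      exact ih (k + 1) m cm rm d (fun x hx => lt_trans (hcm x hx) (by omega)) hd
    · obtain ⟨j, hj⟩ : ∃ j, waScan cm rm k w (PySem.List.enumerate reference 0) = some j := by
        cases h : waScan cm rm k w (PySem.List.enumerate reference 0) with
        | none => exact absurd ((waScan_eq_none_iff cm rm k w _ hkfree).mp h) hz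
        | some j => exact ⟨j, rfl⟩
      obtain ⟨hmem, hfree⟩ := waScan_some_mem cm rm k w _ j hj
      obtain ⟨hdec, hoth, hge⟩ := cntU_add rm w _ j (nodup_fst_enumerate reference) hmem hfree
      have hpos : (0 : Int) < d.getD w 0 := by
        rw [hd w]; exact_mod_cast Nat.pos_of_ne_zero hz
      have hB : wbStep (m, d) w = (m + 1, d.insert w (d.getD w 0 - 1)) := by
        simp only [wbStep]; rw [if_pos hpos]
      rw [hB]
      simp only [waStep, hj]
      apply ih
      · intro x hx
        rcases (PySem.Set.mem_add _ _ _).mp hx with h | h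
        · exact lt_trans (hcm x h) (by omega)
        · omega
      · intro w'
        by_cases he : w' = w
        · subst he
          rw [PySem.Dict.getD_insert_self, hd w', hdec]
          push_cast [Nat.cast_sub hge]
          ring
        · rw [PySem.Dict.getD_insert, if_neg he, hd w', hoth w' he]

-- ===== VERDICT (by name: the statement is the Claim_ definition above) =====
theorem word_alignment_py_spec : Claim_equal_word_alignment_py := by
  intro candidate reference _
  have hd : ∀ w, (reference.foldl (fun d w => d.insert w (d.getD w 0 + 1)) PySem.Dict.empty).getD w 0
      = (cntU (PySem.List.enumerate reference 0) PySem.Set.empty w : Int) := by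
    intro w
    rw [PySem.Dict.getD_foldl_insert_add_one, PySem.Dict.getD_empty, cntU_enumerate_empty]
    simp
  have h := main_inv reference candidate 0 0 PySem.Set.empty PySem.Set.empty _
    (by intro x hx; cases hx) hd
  unfold Spec_word_alignment_py word_alignment_py word_alignment_py_alt
  simp only [List.cons.injEq, and_true]
  exact h
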